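-- pv_equiv track=rewrite | github.com/uh-nmb/kaspar_ros | src/herkulex/herkulex_driver/src/herkulex_io.py | _checksum1
-- ===== SOURCE A (Python) =====
-- def _checksum1(packetBuffer):
--     """
--     Compute checksum 1 for packet
--          (PacketSize ^ pID ^ CMD ^ Data[0] ^ ... ^ Data[n]) & 0xFE
--
--     @param: packetBuffer the servo packet to compute
--     @return computed checksum
--     """
--     chksum1 = 0x00
--
--     skip = [0, 1, 5, 6]  # Header and checksum 1/2
--     for i in range(0, len(packetBuffer)):
--         if i in skip:
--             continue
--         chksum1 ^= packetBuffer[i]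
--
--     return chksum1 & 0xFE
-- ===== SOURCE B (Python) =====
-- def _checksum1(packetBuffer):
--     # XOR the whole buffer unconditionally (no index bookkeeping), then
--     # cancel the excluded positions (header bytes 0,1 and checksum
--     # bytes 5,6) using that XOR is its own inverse; mask with 0xFE.
--     total = 0
--     for byte in packetBuffer:
--         total ^= byte
--     for i in (0, 1, 5, 6):
--         if i < len(packetBuffer):
--             total ^= packetBuffer[i]
--     return total & 0xFE
-- ===== Notes on version B (the rewrite author's own statement) =====
-- stated objective: faster
-- what changed: B XORs every byte in one unconditional value loop and afterwards cancels the four excluded header/checksum positions (XOR is its own inverse), instead of iterating over indices and testing each one against a skip list inside the loop.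
import Mathlib
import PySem

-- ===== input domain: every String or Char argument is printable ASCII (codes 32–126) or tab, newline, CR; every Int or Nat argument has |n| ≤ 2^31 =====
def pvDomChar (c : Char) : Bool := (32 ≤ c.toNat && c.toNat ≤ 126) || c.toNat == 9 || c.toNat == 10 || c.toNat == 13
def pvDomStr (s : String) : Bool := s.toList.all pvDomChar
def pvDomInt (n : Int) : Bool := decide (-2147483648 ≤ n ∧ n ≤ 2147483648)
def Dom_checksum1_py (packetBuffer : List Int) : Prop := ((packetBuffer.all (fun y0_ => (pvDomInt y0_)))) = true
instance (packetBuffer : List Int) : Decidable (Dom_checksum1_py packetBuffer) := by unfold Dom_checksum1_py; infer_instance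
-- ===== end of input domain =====

-- B keeps one unconditional XOR aggregate over the whole buffer and cancels the four excluded positions afterwards (objective: alternative decomposition, same O(n) cost).


-- ===== PORT A =====
def checksum1_py (packetBuffer : List Int) : Int :=
  let chksum1 : Int := 0x00
  let skip : List Int := [0, 1, 5, 6]  -- Header and checksum 1/2
  let chksum1 := (PySem.List.pyRange 0 (PySem.List.len packetBuffer)).foldl
    (fun acc i => if i ∈ skip then acc
      else PySem.Int.bxor acc (PySem.List.pyGetD packetBuffer i 0)) chksum1
  PySem.Int.band chksum1 0xFE

-- ===== PORT B =====
def checksum1_py_alt (packetBuffer : List Int) : Int :=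
  let total : Int := packetBuffer.foldl (fun t byte => PySem.Int.bxor t byte) 0
  let total := ([0, 1, 5, 6] : List Nat).foldl
    (fun t i => if i < packetBuffer.length then PySem.Int.bxor t (packetBuffer.getD i 0) else t) total
  PySem.Int.band total 0xFE

-- ===== PRECONDITION & SPEC =====
def Spec_checksum1_py (packetBuffer : List Int) (out : Int) : Prop := out = checksum1_py_alt packetBuffer
instance (packetBuffer : List Int) (out : Int) : Decidable (Spec_checksum1_py packetBuffer out) := by unfold Spec_checksum1_py; infer_instance

-- ===== CLAIM (what is proved, stated in full; the proofs are below) =====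
def Claim_equal_checksum1_py : Prop := ∀ (packetBuffer : List Int), Dom_checksum1_py packetBuffer → Spec_checksum1_py packetBuffer (checksum1_py packetBuffer)

-- ===== LEMMAS AND PROOFS =====

theorem pvBxor_ofNat_ofNat (m n : Nat) :
    PySem.Int.bxor (Int.ofNat m) (Int.ofNat n) = Int.ofNat (m ^^^ n) := by
  simp [PySem.Int.bxor]
theorem pvBxor_ofNat_negSucc (m n : Nat) :
    PySem.Int.bxor (Int.ofNat m) (Int.negSucc n) = Int.negSucc (m ^^^ n) := by
  simp [PySem.Int.bxor, Int.negSucc_eq]; rw [if_neg (by omega)]; omega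
theorem pvBxor_negSucc_ofNat (m n : Nat) :
    PySem.Int.bxor (Int.negSucc m) (Int.ofNat n) = Int.negSucc (m ^^^ n) := by
  simp [PySem.Int.bxor, Int.negSucc_eq]; rw [if_neg (by omega)]; omega
theorem pvBxor_negSucc_negSucc (m n : Nat) :
    PySem.Int.bxor (Int.negSucc m) (Int.negSucc n) = Int.ofNat (m ^^^ n) := by
  simp [PySem.Int.bxor, Int.negSucc_eq]; rw [if_neg (by omega), if_neg (by omega)]
theorem pvBxor_assoc (a b c : Int) :
    PySem.Int.bxor (PySem.Int.bxor a b) c = PySem.Int.bxor a (PySem.Int.bxor b c) := by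
  rcases a with m | m <;> rcases b with n | n <;> rcases c with k | k <;>
    simp only [pvBxor_ofNat_ofNat, pvBxor_ofNat_negSucc, pvBxor_negSucc_ofNat,
      pvBxor_negSucc_negSucc, Nat.xor_assoc]
theorem pvZero_bxor (a : Int) : PySem.Int.bxor 0 a = a := by
  rw [PySem.Int.bxor_comm, PySem.Int.bxor_zero]
theorem pvBxor_left_comm (a b c : Int) :
    PySem.Int.bxor a (PySem.Int.bxor b c) = PySem.Int.bxor b (PySem.Int.bxor a c) := by
  rw [← pvBxor_assoc, PySem.Int.bxor_comm a b, pvBxor_assoc]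
theorem pvBxor_cancel (a b : Int) : PySem.Int.bxor a (PySem.Int.bxor a b) = b := by
  rw [← pvBxor_assoc, PySem.Int.bxor_self, pvZero_bxor]
def pvGo (c : Int) (j : Nat) : List Int → Int
  | [] => c
  | x :: t => pvGo (if j = 0 ∨ j = 1 ∨ j = 5 ∨ j = 6 then c else PySem.Int.bxor c x) (j + 1) t
theorem pvLoopA_aux : ∀ (k : Nat) (xs : List Int) (j : Nat) (c : Int), xs.length ≤ j + k →
    (PySem.List.pyRange (j : Int) (PySem.List.len xs)).foldl
      (fun acc i => if i ∈ ([0, 1, 5, 6] : List Int) then acc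
        else PySem.Int.bxor acc (PySem.List.pyGetD xs i 0)) c
    = pvGo c j (xs.drop j) := by
  intro k
  induction k with
  | zero =>
    intro xs j c hk
    rw [PySem.List.pyRange_one_eq_nil (by simp [PySem.List.len]; omega),
      List.drop_eq_nil_of_le (by omega)]
    rfl
  | succ k ih =>
    intro xs j c hk
    by_cases h : xs.length ≤ j
    · rw [PySem.List.pyRange_one_eq_nil (by simp [PySem.List.len]; omega),
        List.drop_eq_nil_of_le h]
      rfl
    · have hj : j < xs.length := by omega
      have hcons : PySem.List.pyRange (j : Int) (PySem.List.len xs)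
          = (j : Int) :: PySem.List.pyRange ((j : Int) + 1) (PySem.List.len xs) := by
        apply PySem.List.pyRange_one_cons
        simp [PySem.List.len]; exact_mod_cast hj
      have hdrop : xs.drop j = xs[j] :: xs.drop (j + 1) := List.drop_eq_getElem_cons hj
      have hmem : ((j : Int) ∈ ([0, 1, 5, 6] : List Int)) ↔ (j = 0 ∨ j = 1 ∨ j = 5 ∨ j = 6) := by
        simp; omega
      have hget : PySem.List.pyGetD xs (j : Int) 0 = xs[j] := by
        rw [PySem.List.pyGetD_natCast, List.getD_eq_getElem _ _ hj]
      have hcast : ((j : Int) + 1) = ((j + 1 : Nat) : Int) := by push_cast; ring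
      rw [hcons, List.foldl_cons, hdrop]
      show (PySem.List.pyRange ((j : Int) + 1) (PySem.List.len xs)).foldl _ _ = _
      rw [hcast, ih xs (j + 1) _ (by omega)]
      simp only [pvGo, hmem, hget]

theorem pvGo_ge7 : ∀ (t : List Int) (j : Nat) (c : Int), 7 ≤ j →
    pvGo c j t = t.foldl (fun a x => PySem.Int.bxor a x) c := by
  intro t
  induction t with
  | nil => intro j c _; rfl
  | cons x t ih =>
    intro j c hj
    have hns : ¬ (j = 0 ∨ j = 1 ∨ j = 5 ∨ j = 6) := by omega
    simp only [pvGo, hns, List.foldl_cons, if_false]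
    exact ih (j + 1) _ (by omega)
theorem pvFoldlShift : ∀ (l : List Int) (c d : Int),
    l.foldl (fun a x => PySem.Int.bxor a x) (PySem.Int.bxor c d)
    = PySem.Int.bxor (l.foldl (fun a x => PySem.Int.bxor a x) c) d := by
  intro l
  induction l with
  | nil => intro c d; rfl
  | cons x t ih =>
    intro c d
    simp only [List.foldl_cons]
    rw [show PySem.Int.bxor (PySem.Int.bxor c d) x = PySem.Int.bxor (PySem.Int.bxor c x) d by
      rw [pvBxor_assoc, pvBxor_assoc, PySem.Int.bxor_comm d x], ih]
theorem pvMain (xs : List Int) :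
    pvGo 0 0 xs
    = ([0, 1, 5, 6] : List Nat).foldl
        (fun t i => if i < xs.length then PySem.Int.bxor t (xs.getD i 0) else t)
        (xs.foldl (fun t byte => PySem.Int.bxor t byte) 0) := by
  rcases xs with _ | ⟨a, _ | ⟨b, _ | ⟨c, _ | ⟨d, _ | ⟨e, _ | ⟨f, _ | ⟨g, rest⟩⟩⟩⟩⟩⟩⟩
  · rfl
  · simp [pvGo, PySem.Int.bxor_comm, pvBxor_left_comm, pvBxor_assoc,
      PySem.Int.bxor_self, PySem.Int.bxor_zero, pvZero_bxor, pvBxor_cancel]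
  · simp [pvGo, PySem.Int.bxor_comm, pvBxor_left_comm, pvBxor_assoc,
      PySem.Int.bxor_self, PySem.Int.bxor_zero, pvZero_bxor, pvBxor_cancel]
  · simp [pvGo, PySem.Int.bxor_comm, pvBxor_left_comm, pvBxor_assoc,
      PySem.Int.bxor_self, PySem.Int.bxor_zero, pvZero_bxor, pvBxor_cancel]
  · simp [pvGo, PySem.Int.bxor_comm, pvBxor_left_comm, pvBxor_assoc,
      PySem.Int.bxor_self, PySem.Int.bxor_zero, pvZero_bxor, pvBxor_cancel]
  · simp [pvGo, PySem.Int.bxor_comm, pvBxor_left_comm, pvBxor_assoc,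
      PySem.Int.bxor_self, PySem.Int.bxor_zero, pvZero_bxor, pvBxor_cancel]
  · simp [pvGo, PySem.Int.bxor_comm, pvBxor_left_comm, pvBxor_assoc,
      PySem.Int.bxor_self, PySem.Int.bxor_zero, pvZero_bxor, pvBxor_cancel]
  · have hlen : (a :: b :: c :: d :: e :: f :: g :: rest).length = rest.length + 7 := by simp
    have e1 : pvGo 0 0 (a :: b :: c :: d :: e :: f :: g :: rest)
        = rest.foldl (fun t byte => PySem.Int.bxor t byte)
            (PySem.Int.bxor (PySem.Int.bxor (PySem.Int.bxor 0 c) d) e) := by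
      norm_num [pvGo]
      exact pvGo_ge7 rest 7 _ (by omega)
    rw [e1]
    simp only [List.foldl_cons, List.foldl_nil, hlen, List.getD_cons_zero, List.getD_cons_succ]
    rw [if_pos (show 0 < rest.length + 7 by omega), if_pos (show 1 < rest.length + 7 by omega),
      if_pos (show 5 < rest.length + 7 by omega), if_pos (show 6 < rest.length + 7 by omega)]
    rw [← pvFoldlShift, ← pvFoldlShift, ← pvFoldlShift, ← pvFoldlShift]
    congr 1
    simp [PySem.Int.bxor_comm, pvBxor_left_comm, pvBxor_assoc,
      PySem.Int.bxor_self, PySem.Int.bxor_zero, pvZero_bxor, pvBxor_cancel]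

-- ===== VERDICT (by name: the statement is the Claim_ definition above) =====
theorem checksum1_py_spec : Claim_equal_checksum1_py := by
  intro xs _
  unfold Spec_checksum1_py checksum1_py checksum1_py_alt
  dsimp only
  have h := pvLoopA_aux xs.length xs 0 0 (by omega)
  simp only [Nat.cast_zero, List.drop_zero] at h
  rw [h, pvMain]
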